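-- pv_equiv track=rewrite | github.com/open-traffic-generator/snappi-ixnetwork | snappi_ixnetwork/device/utils.py | convert_as_values
-- ===== SOURCE A (Python) =====
-- from collections import namedtuple
-- from collections.abc import Mapping
--
-- def namedtuple_with_defaults(typename, field_names, default_values=()):
--     T = namedtuple(typename, field_names)
--     T.__new__.__defaults__ = (None,) * len(T._fields)
--     if isinstance(default_values, Mapping):
--         prototype = T(**default_values)
--     else:
--         prototype = T(*default_values)
--     T.__new__.__defaults__ = tuple(prototype)
--     return T
--
-- def convert_as_values(as_types, as_values):
--     ConvertedAsValues = namedtuple_with_defaults(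
--         "ConvertedAsValues",
--         ("as_num", "as4_num", "ip_addr", "assign_num", "common_num"),
--         ([], [], [], [], []),
--     )
--
--     convert_values = ConvertedAsValues()
--     for idx, as_type in enumerate(as_types):
--         num, assign = as_values[idx].split(":")
--         convert_values.as_num.append("65101")
--         convert_values.as4_num.append("65101")
--         convert_values.common_num.append("65101")
--         convert_values.ip_addr.append("1.1.1.1")
--         convert_values.assign_num.append(assign)
--         if as_type == "as":
--             convert_values.as_num[idx] = num
--             convert_values.common_num[idx] = num
--         elif as_type == "as4":
--             convert_values.as4_num[idx] = num
--             convert_values.common_num[idx] = num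
--         else:
--             convert_values.ip_addr[idx] = num
--     return convert_values
-- ===== SOURCE B (Python) =====
-- def convert_as_values(as_types, as_values):
--     parsed = []
--     for idx, as_type in enumerate(as_types):
--         num, assign = as_values[idx].split(":")
--         parsed.append((as_type, num, assign))
--     as_num = [n if t == "as" else "65101" for t, n, _ in parsed]
--     as4_num = [n if t == "as4" else "65101" for t, n, _ in parsed]
--     ip_addr = ["1.1.1.1" if t in ("as", "as4") else n for t, n, _ in parsed]
--     assign_num = [a for _, _, a in parsed]
--     common_num = [n if t in ("as", "as4") else "65101" for t, n, _ in parsed]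
--     return (as_num, as4_num, ip_addr, assign_num, common_num)
-- ===== Notes on version B (the rewrite author's own statement) =====
-- stated objective: simpler
-- what changed: Replaces the single mutating loop that appends defaults to five shared lists and then overwrites index idx by one parsing pass into (type, num, assign) triples followed by five independent per-field maps computing each entry directly from the type.
import Mathlib
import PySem

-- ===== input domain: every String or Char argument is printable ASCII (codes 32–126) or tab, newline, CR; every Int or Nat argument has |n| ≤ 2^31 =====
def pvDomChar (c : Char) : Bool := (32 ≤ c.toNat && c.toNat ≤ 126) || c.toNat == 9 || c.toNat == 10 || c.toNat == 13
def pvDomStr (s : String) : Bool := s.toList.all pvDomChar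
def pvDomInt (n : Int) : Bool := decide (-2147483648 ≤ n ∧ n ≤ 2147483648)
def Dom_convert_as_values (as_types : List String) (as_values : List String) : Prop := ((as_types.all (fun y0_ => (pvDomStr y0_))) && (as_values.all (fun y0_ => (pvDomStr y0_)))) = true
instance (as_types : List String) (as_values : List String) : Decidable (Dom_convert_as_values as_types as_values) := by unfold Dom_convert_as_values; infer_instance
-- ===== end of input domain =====

-- B replaces A's single mutating loop (append defaults, overwrite index idx in five shared lists)
-- by a one-pass parse into (type, num, assign) triples plus five independent per-field maps: simpler.


-- ===== PORT A =====
-- Python list assignment `lst[idx] = v` at the nonnegative index produced by enumerate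
def pvSetAt (xs : List String) (i : Int) (v : String) : List String := xs.set i.toNat v

-- state: (as_num, as4_num, ip_addr, assign_num, common_num), mutated like A's namedtuple fields
def convert_as_values (as_types : List String) (as_values : List String) : List String × List String × List String × List String × List String :=
  (PySem.List.enumerate as_types 0).foldl
    (fun cv p =>
      let idx := p.1
      let as_type := p.2
      -- `num, assign = as_values[idx].split(":")`; a non-2-way split or missing index raises in Python (outside Pre_)
      match (PySem.Str.split? (PySem.List.pyGetD as_values idx "") ":").getD [] with
      | [num, assign] =>
        let a  := cv.1 ++ ["65101"]
        let a4 := cv.2.1 ++ ["65101"]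
        let ip := cv.2.2.1 ++ ["1.1.1.1"]
        let asg := cv.2.2.2.1 ++ [assign]
        let cm := cv.2.2.2.2 ++ ["65101"]
        if as_type = "as" then (pvSetAt a idx num, a4, ip, asg, pvSetAt cm idx num)
        else if as_type = "as4" then (a, pvSetAt a4 idx num, ip, asg, pvSetAt cm idx num)
        else (a, a4, pvSetAt ip idx num, asg, cm)
      | _ => cv)
    ([], [], [], [], [])

-- ===== PORT B =====
-- one parsing pass: (as_type, num, assign) per element (malformed split raises in Python, outside Pre_)
def pvParse (as_types : List String) (as_values : List String) : List (String × String × String) :=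
  (PySem.List.enumerate as_types 0).map
    (fun p =>
      let parts := (PySem.Str.split? (PySem.List.pyGetD as_values p.1 "") ":").getD []
      (p.2, parts.getD 0 "", parts.getD 1 ""))

def convert_as_values_alt (as_types : List String) (as_values : List String) : List String × List String × List String × List String × List String :=
  let parsed := pvParse as_types as_values
  (parsed.map (fun t => if t.1 = "as" then t.2.1 else "65101"),
   parsed.map (fun t => if t.1 = "as4" then t.2.1 else "65101"),
   parsed.map (fun t => if t.1 = "as" ∨ t.1 = "as4" then "1.1.1.1" else t.2.1),
   parsed.map (fun t => t.2.2),
   parsed.map (fun t => if t.1 = "as" ∨ t.1 = "as4" then t.2.1 else "65101"))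

-- ===== PRECONDITION & SPEC =====
-- exactly the inputs where Python A returns: every used value exists and splits on ":" into exactly two parts
def Pre_convert_as_values (as_types : List String) (as_values : List String) : Prop :=
  as_types.length ≤ as_values.length ∧
  ∀ i < as_types.length, ((PySem.Str.split? (as_values.getD i "") ":").getD []).length = 2
instance (as_types : List String) (as_values : List String) : Decidable (Pre_convert_as_values as_types as_values) := by unfold Pre_convert_as_values; infer_instance

def pvWitness_convert_as_values : List String × List String := (["as", "as4", "ip"], ["65000:1", "70000:2", "9.9.9.9:3"])

def Spec_convert_as_values (as_types : List String) (as_values : List String) (out : List String × List String × List String × List String × List String) : Prop := out = convert_as_values_alt as_types as_values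
instance (as_types : List String) (as_values : List String) (out : List String × List String × List String × List String × List String) : Decidable (Spec_convert_as_values as_types as_values out) := by unfold Spec_convert_as_values; infer_instance

-- ===== CLAIM (what is proved, stated in full; the proofs are below) =====
def Claim_equal_convert_as_values : Prop := ∀ (as_types : List String) (as_values : List String), Dom_convert_as_values as_types as_values → Pre_convert_as_values as_types as_values → Spec_convert_as_values as_types as_values (convert_as_values as_types as_values)

-- ===== LEMMAS AND PROOFS =====

theorem set_append_len (a : List String) (x v : String) : (a ++ [x]).set a.length v = a ++ [v] := by
  induction a with
  | nil => rfl
  | cons h t ih => simp [ih]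

-- main invariant: from any start index k with accumulator lists of length k, A's fold appends exactly B's per-field maps
theorem fold_eq (as_values : List String) (ts : List String) (k : Nat)
    (a a4 ip asg cm : List String)
    (ha : a.length = k) (ha4 : a4.length = k) (hip : ip.length = k)
    (hasg : asg.length = k) (hcm : cm.length = k)
    (hPre : ∀ i, k ≤ i → i < k + ts.length → ((PySem.Str.split? (as_values.getD i "") ":").getD []).length = 2) :
    (PySem.List.enumerate ts (k : Int)).foldl
      (fun cv p =>
        let idx := p.1
        let as_type := p.2
        match (PySem.Str.split? (PySem.List.pyGetD as_values idx "") ":").getD [] with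
        | [num, assign] =>
          let a  := cv.1 ++ ["65101"]
          let a4 := cv.2.1 ++ ["65101"]
          let ip := cv.2.2.1 ++ ["1.1.1.1"]
          let asg := cv.2.2.2.1 ++ [assign]
          let cm := cv.2.2.2.2 ++ ["65101"]
          if as_type = "as" then (pvSetAt a idx num, a4, ip, asg, pvSetAt cm idx num)
          else if as_type = "as4" then (a, pvSetAt a4 idx num, ip, asg, pvSetAt cm idx num)
          else (a, a4, pvSetAt ip idx num, asg, cm)
        | _ => cv)
      (a, a4, ip, asg, cm)
    = (let parsed := (PySem.List.enumerate ts (k : Int)).map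
        (fun p =>
          let parts := (PySem.Str.split? (PySem.List.pyGetD as_values p.1 "") ":").getD []
          (p.2, parts.getD 0 "", parts.getD 1 ""))
       (a ++ parsed.map (fun t => if t.1 = "as" then t.2.1 else "65101"),
        a4 ++ parsed.map (fun t => if t.1 = "as4" then t.2.1 else "65101"),
        ip ++ parsed.map (fun t => if t.1 = "as" ∨ t.1 = "as4" then "1.1.1.1" else t.2.1),
        asg ++ parsed.map (fun t => t.2.2),
        cm ++ parsed.map (fun t => if t.1 = "as" ∨ t.1 = "as4" then t.2.1 else "65101"))) := by
  induction ts generalizing k a a4 ip asg cm with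
  | nil => simp [PySem.List.enumerate_nil]
  | cons t ts ih =>
    rw [PySem.List.enumerate_cons]
    have hk : ((PySem.Str.split? (as_values.getD k "") ":").getD []).length = 2 :=
      hPre k (le_refl k) (by simp)
    have hget : PySem.List.pyGetD as_values (k : Int) "" = as_values.getD k "" :=
      PySem.List.pyGetD_natCast ..
    rcases hsp : (PySem.Str.split? (as_values.getD k "") ":").getD [] with _ | ⟨num, _ | ⟨assign, _ | _⟩⟩ <;>
      rw [hsp] at hk <;> simp at hk
    have hstep : ∀ (l : List String) (x : String), l.length = k → pvSetAt (l ++ [x]) (k : Int) num = l ++ [num] := by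
      intro l x hl
      simp only [pvSetAt, Int.toNat_natCast, ← hl]
      exact set_append_len l x num
    have hcast : ((k : Int) + 1) = ((k + 1 : Nat) : Int) := by push_cast; ring
    simp only [List.foldl_cons, List.map_cons, hget, hsp, hcast]
    by_cases h1 : t = "as"
    · simp only [h1]
      rw [hstep a _ ha, hstep cm _ hcm,
        ih (k + 1) _ _ _ _ _ (by simp [ha]) (by simp [ha4]) (by simp [hip]) (by simp [hasg]) (by simp [hcm])
          (fun i h1 h2 => hPre i (by omega) (by simp at h2 ⊢; omega))]
      simp
    · by_cases h2 : t = "as4"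
      · simp only [h2]
        rw [hstep a4 _ ha4, hstep cm _ hcm,
          ih (k + 1) _ _ _ _ _ (by simp [ha]) (by simp [ha4]) (by simp [hip]) (by simp [hasg]) (by simp [hcm])
            (fun i h1 h2 => hPre i (by omega) (by simp at h2 ⊢; omega))]
        simp
      · simp only [if_neg h1, if_neg h2, if_neg (show ¬(t = "as" ∨ t = "as4") by tauto)]
        rw [hstep ip _ hip,
          ih (k + 1) _ _ _ _ _ (by simp [ha]) (by simp [ha4]) (by simp [hip]) (by simp [hasg]) (by simp [hcm])
            (fun i h1 h2 => hPre i (by omega) (by simp at h2 ⊢; omega))]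
        simp

-- ===== VERDICT (by name: the statement is the Claim_ definition above) =====
theorem convert_as_values_spec : Claim_equal_convert_as_values := by
  intro as_types as_values _hDom hPre
  unfold Spec_convert_as_values convert_as_values convert_as_values_alt pvParse
  have := fold_eq as_values as_types 0 [] [] [] [] [] rfl rfl rfl rfl rfl
    (by intro i h0 hlt; exact hPre.2 i (by omega))
  simpa using this
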